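/- GENERATED by farm/mkstatement.py from design/units.tsv (unit `codebook_decode_deinterleave_repeat.2a`) and the assertions of Vorbis/Spec/Codebook/Deint2.lean — do not edit.
   THE STATEMENT of the proof unit `codebook_decode_deinterleave_repeat.2a`: segment 2a of `codebook_decode_deinterleave_repeat` (10 instructions; entries 0x10de09;
   exits 0x10de32,0x10df30; ranges 0x10dc3e-0x10dc48 + 0x10de09-0x10de2c)
   takes each of its entry assertions to one of its exit assertions (`Vorbis.Spec.Deint.Claim2a`), given the contracts of its callees.
   What the names mean: Vorbis/Spec/Basic.lean (the shared hypotheses), Vorbis/Spec/Codebook/Deint2.lean (the assertions). The theorem to prove: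
   `theorem codebook_decode_deinterleave_repeat_2a_ok : Vorbis.Spec.codebook_decode_deinterleave_repeat_2a.Statement`. -/
import Vorbis.Spec.Codebook.Deint2
import Vorbis.Spec.Reader
namespace Vorbis.Spec.codebook_decode_deinterleave_repeat_2a
open X86 X86.User Asan

/-- The statement of unit `codebook_decode_deinterleave_repeat.2a`. -/
def Statement : Prop :=
  ∀ (Lay : Layout) (_hLay : Lay.hi = 0x1000000) (μ : Microarch) (_hμ : UserX.MicroOK μ) (u₀ : State)
    (_hcode : HasCodeNat Lay u₀ Vorbis.L.codebook_decode_deinterleave_repeat.entry Vorbis.Code.code_codebook_decode_deinterleave_repeat.nat Vorbis.L.codebook_decode_deinterleave_repeat.size)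
    (_h_prep_huffman : ∀ (others : List Obj) (frames : List (Nat × FrameLayout)) (Blk : Block → Prop) (len : Nat), Calls Lay μ Vorbis.WayInv (Vorbis.conv u₀) Vorbis.L.prep_huffman.entry (Vorbis.Spec.prep_huffman.spec others frames Blk len))
    (_h_asan_load4_noabort : Asan.SmallCheck Lay μ Vorbis.WayInv (Vorbis.CodeOK u₀) [.rax, .rcx, .rdx] 4 Vorbis.L.__asan_load4_noabort.entry),
    Vorbis.Spec.Deint.Claim2a Lay μ u₀

end Vorbis.Spec.codebook_decode_deinterleave_repeat_2a
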